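-- pv_equiv track=rewrite | github.com/Badis-Bfifteen/TP-RF | UtilityFunctions.py | convert_bin
-- ===== SOURCE A (Python) =====
-- def convert_bin(pixels):
--     """
--     :param pixels: list de pixel
--     :return: Bool success
--     """
--     bin_new_pixels = []
--     for pixel in pixels:
--         if pixel[0] == pixel[1] == pixel[2]:
--             if pixel[0] == 255:
--                 bin_new_pixels.append((1, 1, 1))
--             elif pixel[0] == 0:
--                 bin_new_pixels.append((0, 0, 0))
--             else:
--                 return False, None
--         else:
--             return False, None
--     return True, bin_new_pixels
-- ===== SOURCE B (Python) =====
-- def convert_bin(pixels):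
--     if all(p[0] == p[1] == p[2] and p[0] in (0, 255) for p in pixels):
--         return True, [(1, 1, 1) if p[0] == 255 else (0, 0, 0) for p in pixels]
--     return False, None
-- ===== Notes on version B (the rewrite author's own statement) =====
-- stated objective: idiomatic
-- what changed: Replaced A's single interleaved validate-and-build loop with early returns by a validate-all pass (short-circuiting all(...)) followed by a separate map pass building the output as a comprehension.
import Mathlib
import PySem

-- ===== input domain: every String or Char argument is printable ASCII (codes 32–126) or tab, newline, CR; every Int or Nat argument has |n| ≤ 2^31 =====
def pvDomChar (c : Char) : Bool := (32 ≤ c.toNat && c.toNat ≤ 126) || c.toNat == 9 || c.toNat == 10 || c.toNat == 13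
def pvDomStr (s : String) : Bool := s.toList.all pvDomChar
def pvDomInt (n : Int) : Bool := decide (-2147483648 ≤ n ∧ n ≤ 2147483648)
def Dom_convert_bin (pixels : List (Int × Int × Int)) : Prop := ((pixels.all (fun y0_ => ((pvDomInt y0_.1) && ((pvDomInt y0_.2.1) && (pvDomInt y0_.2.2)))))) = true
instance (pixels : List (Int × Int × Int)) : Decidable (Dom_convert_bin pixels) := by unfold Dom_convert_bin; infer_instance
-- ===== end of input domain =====

-- B validates every pixel in one short-circuiting pass, then maps in a second pass; A interleaves validation and building in one loop with early returns. Objective: idiomatic.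

-- ===== PORT A =====
-- the for-loop with early return, accumulator `bin_new_pixels` appended at the back
def convertBinLoop (acc : List (Int × Int × Int)) :
    List (Int × Int × Int) → Bool × (Option (List (Int × Int × Int)))
  | [] => (true, some acc)
  | p :: rest =>
    if p.1 = p.2.1 ∧ p.2.1 = p.2.2 then
      if p.1 = 255 then convertBinLoop (acc ++ [(1, 1, 1)]) rest
      else if p.1 = 0 then convertBinLoop (acc ++ [(0, 0, 0)]) rest
      else (false, none)
    else (false, none)

def convert_bin (pixels : List (Int × Int × Int)) : Bool × (Option (List (Int × Int × Int))) :=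
  convertBinLoop [] pixels

-- ===== PORT B =====
def convert_bin_alt (pixels : List (Int × Int × Int)) : Bool × (Option (List (Int × Int × Int))) :=
  if pixels.all (fun p => p.1 == p.2.1 && p.2.1 == p.2.2 && (p.1 == 0 || p.1 == 255)) then
    (true, some (pixels.map (fun p => if p.1 == 255 then (1, 1, 1) else (0, 0, 0))))
  else (false, none)

-- ===== PRECONDITION & SPEC =====
def Spec_convert_bin (pixels : List (Int × Int × Int)) (out : Bool × (Option (List (Int × Int × Int)))) : Prop := out = convert_bin_alt pixels
instance (pixels : List (Int × Int × Int)) (out : Bool × (Option (List (Int × Int × Int)))) : Decidable (Spec_convert_bin pixels out) := by unfold Spec_convert_bin; infer_instance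

-- ===== CLAIM (what is proved, stated in full; the proofs are below) =====
def Claim_equal_convert_bin : Prop := ∀ (pixels : List (Int × Int × Int)), Dom_convert_bin pixels → Spec_convert_bin pixels (convert_bin pixels)

-- ===== LEMMAS AND PROOFS =====
theorem convertBinLoop_eq (pixels : List (Int × Int × Int)) (acc : List (Int × Int × Int)) :
    convertBinLoop acc pixels =
      if pixels.all (fun p => p.1 == p.2.1 && p.2.1 == p.2.2 && (p.1 == 0 || p.1 == 255)) then
        (true, some (acc ++ pixels.map (fun p => if p.1 == 255 then (1, 1, 1) else (0, 0, 0))))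
      else (false, none) := by
  induction pixels generalizing acc with
  | nil => simp [convertBinLoop]
  | cons p rest ih =>
    obtain ⟨a, b, c⟩ := p
    simp only [convertBinLoop, List.all_cons, List.map_cons]
    by_cases h1 : a = b ∧ b = c
    · obtain ⟨ha, hb⟩ := h1
      subst ha; subst hb
      by_cases h255 : a = 255
      · subst h255; simp [ih, List.append_assoc]; rfl
      · by_cases h0 : a = 0
        · subst h0; simp [h255, ih, List.append_assoc]; rfl
        · simp [h255, h0]
    · rw [if_neg h1]
      rcases not_and_or.mp h1 with h | h <;> simp [h]

-- ===== VERDICT (by name: the statement is the Claim_ definition above) =====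
theorem convert_bin_spec : Claim_equal_convert_bin := by
  intro pixels _
  unfold Spec_convert_bin convert_bin convert_bin_alt
  rw [convertBinLoop_eq]
  simp
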